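-- pv_equiv track=rewrite | github.com/AmirAsgary/TCRtyper | dev_test_scripts/dataset_processing/plot_donor_hla_typing.py | _order_loci
-- ===== SOURCE A (Python) =====
-- from typing import Dict, Iterable, List, Optional, Tuple
--
-- CLASS_I_LOCI_ORDER = ["A", "B", "C"]
--
-- CLASS_II_LOCI_ORDER = [
--     "DPA1",
--     "DPB1",
--     "DQA1",
--     "DQB1",
--     "DRA1",
--     "DRB1",
--     "DRB3",
--     "DRB4",
--     "DRB5",
-- ]
--
-- def _order_loci(loci: Iterable[str]) -> Tuple[List[str], List[str], List[str]]:
--     loci_set = set(loci)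
--     class_i = [l for l in CLASS_I_LOCI_ORDER if l in loci_set]
--
--     class_ii_candidates = sorted([l for l in loci_set if l.startswith("D")])
--     class_ii: List[str] = [l for l in CLASS_II_LOCI_ORDER if l in class_ii_candidates]
--     for locus in class_ii_candidates:
--         if locus not in class_ii:
--             class_ii.append(locus)
--
--     other = sorted([l for l in loci_set if l not in class_i and not l.startswith("D")])
--     return class_i, class_ii, other
-- ===== SOURCE B (Python) =====
-- from typing import Iterable, List, Tuple
--
-- CLASS_I_LOCI_ORDER = ["A", "B", "C"]
--
-- CLASS_II_LOCI_ORDER = [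
--     "DPA1",
--     "DPB1",
--     "DQA1",
--     "DQB1",
--     "DRA1",
--     "DRB1",
--     "DRB3",
--     "DRB4",
--     "DRB5",
-- ]
--
-- def _order_loci(loci: Iterable[str]) -> Tuple[List[str], List[str], List[str]]:
--     class_i: List[str] = []
--     class_ii: List[str] = []
--     other: List[str] = []
--     for l in set(loci):
--         if l.startswith("D"):
--             class_ii.append(l)
--         elif l == "A" or l == "B" or l == "C":
--             class_i.append(l)
--         else:
--             other.append(l)
--     rank = {l: i for i, l in enumerate(CLASS_II_LOCI_ORDER)}
--     class_i.sort(key=CLASS_I_LOCI_ORDER.index)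
--     class_ii.sort(key=lambda l: (rank.get(l, len(CLASS_II_LOCI_ORDER)), l))
--     other.sort()
--     return class_i, class_ii, other
-- ===== Notes on version B (the rewrite author's own statement) =====
-- stated objective: simpler
-- what changed: Replaces A's per-bucket set comprehensions and the filter-then-append merge loop for class II with one partitioning pass over set(loci) followed by a single rank-keyed sort per bucket.
import Mathlib
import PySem

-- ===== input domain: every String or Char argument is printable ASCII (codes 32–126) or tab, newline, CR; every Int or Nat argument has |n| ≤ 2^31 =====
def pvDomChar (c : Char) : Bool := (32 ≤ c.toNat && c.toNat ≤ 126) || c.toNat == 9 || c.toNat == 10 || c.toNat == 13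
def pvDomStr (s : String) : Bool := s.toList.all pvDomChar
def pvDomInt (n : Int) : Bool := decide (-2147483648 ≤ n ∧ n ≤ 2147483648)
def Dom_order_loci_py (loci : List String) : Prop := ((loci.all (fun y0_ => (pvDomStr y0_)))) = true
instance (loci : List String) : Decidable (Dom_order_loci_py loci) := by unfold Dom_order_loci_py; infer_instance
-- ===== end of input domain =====

-- B replaces A's per-bucket set comprehensions and class-II merge loop by one partitioning
-- pass over the set plus one rank-keyed sort per bucket (objective: simpler).
-- Python string comparison inside sorted() is code-point lexicographic = '<' on s.toList
-- (PYSEM.md 'str COMPARISON'), so both ports sort string values with key (·.toList).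

def classIOrderL : List String := ["A", "B", "C"]

def classIIOrderL : List String :=
  ["DPA1", "DPB1", "DQA1", "DQB1", "DRA1", "DRB1", "DRB3", "DRB4", "DRB5"]

-- ===== PORT A =====
def order_loci_py (loci : List String) : List String × List String × List String :=
  let lociSet : PySem.Set String := PySem.Set.ofList loci
  let classI := classIOrderL.filter (fun l => lociSet.contains l)
  let classIICand :=
    PySem.List.sorted (lociSet.filter (fun l => PySem.Str.startswith l "D")) (fun l => l.toList) false
  let classII0 := classIIOrderL.filter (fun l => classIICand.contains l)
  let classII := classIICand.foldl
    (fun acc locus => if acc.contains locus then acc else acc ++ [locus]) classII0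
  let other :=
    PySem.List.sorted
      (lociSet.filter (fun l => !classI.contains l && !PySem.Str.startswith l "D"))
      (fun l => l.toList) false
  (classI, classII, other)

-- ===== PORT B =====
-- rank = {l: i for i, l in enumerate(CLASS_II_LOCI_ORDER)}
def rankII : PySem.Dict String Int :=
  PySem.Dict.ofList ((PySem.List.enumerate classIIOrderL).map (fun p => (p.2, p.1)))

def order_loci_py_alt (loci : List String) : List String × List String × List String :=
  let buckets := (PySem.Set.ofList loci).foldl
    (fun (acc : List String × List String × List String) l =>
      if PySem.Str.startswith l "D" then (acc.1, acc.2.1 ++ [l], acc.2.2)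
      else if l == "A" || l == "B" || l == "C" then (acc.1 ++ [l], acc.2.1, acc.2.2)
      else (acc.1, acc.2.1, acc.2.2 ++ [l])) ([], [], [])
  -- class_i.sort(key=CLASS_I_LOCI_ORDER.index): every bucket element is in that list,
  -- so Python's .index never raises and the getD default is never reached
  let classI := PySem.List.sorted buckets.1 (fun l => (PySem.List.index? classIOrderL l).getD 0) false
  -- class_ii.sort(key=lambda l: (rank.get(l, len(CLASS_II_LOCI_ORDER)), l)): tuple key → sorted2
  let classII := PySem.List.sorted2 buckets.2.1
    (fun l => rankII.getD l (classIIOrderL.length : Int)) (fun l => l.toList) false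
  let other := PySem.List.sorted buckets.2.2 (fun l => l.toList) false
  (classI, classII, other)

-- ===== PRECONDITION & SPEC =====
def Spec_order_loci_py (loci : List String) (out : List String × List String × List String) : Prop := out = order_loci_py_alt loci
instance (loci : List String) (out : List String × List String × List String) : Decidable (Spec_order_loci_py loci out) := by unfold Spec_order_loci_py; infer_instance

-- ===== CLAIM (what is proved, stated in full; the proofs are below) =====
def Claim_equal_order_loci_py : Prop := ∀ (loci : List String), Dom_order_loci_py loci → Spec_order_loci_py loci (order_loci_py loci)

-- ===== LEMMAS AND PROOFS =====

-- the three bucket predicates of B's partition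
def pD (l : String) : Bool := PySem.Str.startswith l "D"
def pABC (l : String) : Bool := l == "A" || l == "B" || l == "C"

-- B's partitioning foldl is three filters
theorem buckets_eq (xs : List String) (a b c : List String) :
    xs.foldl (fun (acc : List String × List String × List String) l =>
      if PySem.Str.startswith l "D" then (acc.1, acc.2.1 ++ [l], acc.2.2)
      else if l == "A" || l == "B" || l == "C" then (acc.1 ++ [l], acc.2.1, acc.2.2)
      else (acc.1, acc.2.1, acc.2.2 ++ [l])) (a, b, c)
    = (a ++ xs.filter (fun l => !pD l && pABC l), b ++ xs.filter (fun l => pD l),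
       c ++ xs.filter (fun l => !pD l && !pABC l)) := by
  induction xs generalizing a b c with
  | nil => simp
  | cons x xs ih =>
    rw [List.foldl_cons]
    by_cases hD : pD x = true
    · have hD' : PySem.Str.startswith x "D" = true := hD
      simp only [hD', if_true]
      rw [ih]
      simp [hD]
    · have hD2 : pD x = false := by simpa using hD
      have hD' : PySem.Str.startswith x "D" = false := hD2
      simp only [hD', Bool.false_eq_true, if_false]
      by_cases hA : pABC x = true
      · have hA' : (x == "A" || x == "B" || x == "C") = true := hA
        simp only [hA', if_true]
        rw [ih]
        simp [hD2, hA]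
      · have hA2 : pABC x = false := by simpa using hA
        have hA' : (x == "A" || x == "B" || x == "C") = false := hA2
        simp only [hA', Bool.false_eq_true, if_false]
        rw [ih]
        simp [hD2, hA2]

-- A's merge loop over a nodup list appends exactly the elements missing from the accumulator
theorem merge_loop_eq (cand : List String) (init : List String) (h : cand.Nodup) :
    cand.foldl (fun acc locus => if acc.contains locus then acc else acc ++ [locus]) init
    = init ++ cand.filter (fun l => !init.contains l) := by
  induction cand generalizing init with
  | nil => simp
  | cons x xs ih =>
    have hx' : x ∉ xs := (List.nodup_cons.mp h).1
    have ht : xs.Nodup := (List.nodup_cons.mp h).2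
    rw [List.foldl_cons]
    by_cases hx : init.contains x = true
    · simp only [hx, if_true]
      rw [ih _ ht]
      simp [List.filter_cons]
      simpa using hx
    · have hx2 : init.contains x = false := by simpa using hx
      simp only [hx2, Bool.false_eq_true, if_false]
      rw [ih _ ht]
      have hfc : xs.filter (fun l => !(init ++ [x]).contains l) = xs.filter (fun l => !init.contains l) := by
        refine List.filter_congr ?_
        intro y hy
        have : y ≠ x := fun hyx => hx' (hyx ▸ hy)
        simp [this]
      rw [hfc]
      simp [List.filter_cons]
      simpa using hx2

-- sorted is independent of the DecidableLT instance
theorem sorted_di {α κ : Type} [LT κ] {d1 d2 : DecidableLT κ} (xs : List α) (key : α → κ) (rev : Bool) :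
    @PySem.List.sorted α κ _ d1 xs key rev = @PySem.List.sorted α κ _ d2 xs key rev := by
  congr 1

-- B's sorted2 with an Int first key and a List Char second key is sorted with the lexicographic key
theorem sorted2_eq_sorted_lex (xs : List String) (k1 : String → Int) (k2 : String → List Char) :
    PySem.List.sorted2 xs k1 k2 false
    = PySem.List.sorted xs (fun l => toLex (k1 l, k2 l)) false := by
  simp only [PySem.List.sorted2, PySem.List.sorted]
  congr 1
  funext acc x
  congr 1
  funext a b
  rcases lt_trichotomy (k1 a) (k1 b) with h | h | h
  · simp [h, asymm h, Prod.Lex.toLex_lt_toLex]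
  · simp [h, Prod.Lex.toLex_lt_toLex]
  · simp [h, asymm h, Prod.Lex.toLex_le_toLex]

theorem pD_of_pABC (x : String) (h : pABC x = true) : pD x = false := by
  simp [pABC] at h
  rcases h with (h | h) | h <;> subst h <;> decide

theorem pABC_iff (x : String) : pABC x = true ↔ x ∈ classIOrderL := by
  simp [pABC, classIOrderL]; tauto

theorem rank_notin (l : String) (hl : l ∉ classIIOrderL) :
    rankII.getD l (classIIOrderL.length : Int) = 9 := by
  simp [classIIOrderL] at hl
  obtain ⟨h1,h2,h3,h4,h5,h6,h7,h8,h9⟩ := hl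
  have g1 : ("DPA1" == l) = false := beq_eq_false_iff_ne.mpr (fun e => h1 e.symm)
  have g2 : ("DPB1" == l) = false := beq_eq_false_iff_ne.mpr (fun e => h2 e.symm)
  have g3 : ("DQA1" == l) = false := beq_eq_false_iff_ne.mpr (fun e => h3 e.symm)
  have g4 : ("DQB1" == l) = false := beq_eq_false_iff_ne.mpr (fun e => h4 e.symm)
  have g5 : ("DRA1" == l) = false := beq_eq_false_iff_ne.mpr (fun e => h5 e.symm)
  have g6 : ("DRB1" == l) = false := beq_eq_false_iff_ne.mpr (fun e => h6 e.symm)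
  have g7 : ("DRB3" == l) = false := beq_eq_false_iff_ne.mpr (fun e => h7 e.symm)
  have g8 : ("DRB4" == l) = false := beq_eq_false_iff_ne.mpr (fun e => h8 e.symm)
  have g9 : ("DRB5" == l) = false := beq_eq_false_iff_ne.mpr (fun e => h9 e.symm)
  have hit : rankII.items = [("DPA1", (0:Int)), ("DPB1", 1), ("DQA1", 2), ("DQB1", 3), ("DRA1", 4),
      ("DRB1", 5), ("DRB3", 6), ("DRB4", 7), ("DRB5", 8)] := by decide
  simp [PySem.Dict.getD, PySem.Dict.get?, hit, List.find?, g1,g2,g3,g4,g5,g6,g7,g8,g9]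
  decide

-- class I bucket: A's order-list filter IS B's index-keyed sort of the partition bucket
theorem classI_eq (loci : List String) :
    classIOrderL.filter (fun l => (PySem.Set.ofList loci).contains l)
    = PySem.List.sorted ((PySem.Set.ofList loci).filter (fun l => !pD l && pABC l))
        (fun l => (PySem.List.index? classIOrderL l).getD 0) false := by
  have hS : (PySem.Set.ofList loci).Nodup := PySem.Set.nodup_ofList loci
  refine (PySem.List.sorted_eq_of_perm_of_pairwise_lt _ _ _ ?_ ?_).symm
  · rw [List.perm_ext_iff_of_nodup ((by decide : classIOrderL.Nodup).filter _) (hS.filter _)]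
    intro x
    simp only [List.mem_filter]
    constructor
    · rintro ⟨hx, hc⟩
      have hx' : pABC x = true := (pABC_iff x).mpr hx
      exact ⟨by simpa using hc, by simp [pD_of_pABC x hx', hx']⟩
    · rintro ⟨hxS, hb⟩
      have hx' : pABC x = true := by
        rcases Bool.and_eq_true_iff.mp hb with ⟨_, h2⟩; exact h2
      exact ⟨(pABC_iff x).mp hx', by simpa using hxS⟩
  · exact List.Pairwise.filter _
      (by decide : classIOrderL.Pairwise
        (fun a b => (PySem.List.index? classIOrderL a).getD 0 < (PySem.List.index? classIOrderL b).getD 0))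


theorem contains_classI_eq (loci : List String) (x : String) (hx : x ∈ PySem.Set.ofList loci) :
    (classIOrderL.filter (fun l => (PySem.Set.ofList loci).contains l)).contains x = pABC x := by
  by_cases h : pABC x = true
  · rw [h]
    rw [List.contains_iff_mem]
    simp only [List.mem_filter]
    exact ⟨(pABC_iff x).mp h, by simpa using hx⟩
  · have h2 : pABC x = false := by simpa using h
    rw [h2]
    rw [Bool.eq_false_iff, Ne, List.contains_iff_mem]
    simp only [List.mem_filter]
    rintro ⟨hmem, -⟩
    exact h ((pABC_iff x).mpr hmem)

-- the 'other' bucket: A's not-in-class_i test equals B's not-A/B/C test on members of the set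
theorem other_filter_eq (loci : List String) :
    (PySem.Set.ofList loci).filter
        (fun l => !(classIOrderL.filter (fun l2 => (PySem.Set.ofList loci).contains l2)).contains l
                  && !PySem.Str.startswith l "D")
      = (PySem.Set.ofList loci).filter (fun l => !pD l && !pABC l) := by
  refine List.filter_congr ?_
  intro x hx
  rw [contains_classI_eq loci x hx]
  show (!pABC x && !pD x) = (!pD x && !pABC x)
  exact Bool.and_comm _ _

-- class II bucket: A's known-order filter followed by the merge loop IS B's rank-keyed sort
theorem classII_eq (loci : List String) :
    (PySem.List.sorted ((PySem.Set.ofList loci).filter (fun l => PySem.Str.startswith l "D"))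
        (fun l => l.toList) false).foldl
      (fun acc locus => if acc.contains locus then acc else acc ++ [locus])
      (classIIOrderL.filter (fun l =>
        (PySem.List.sorted ((PySem.Set.ofList loci).filter (fun l2 => PySem.Str.startswith l2 "D"))
          (fun l2 => l2.toList) false).contains l))
    = PySem.List.sorted2 ((PySem.Set.ofList loci).filter (fun l => pD l))
        (fun l => rankII.getD l (classIIOrderL.length : Int)) (fun l => l.toList) false := by
  have hFf : (PySem.Set.ofList loci).filter (fun l => pD l)
      = (PySem.Set.ofList loci).filter (fun l => PySem.Str.startswith l "D") := rfl
  rw [sorted2_eq_sorted_lex, hFf]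
  set F := (PySem.Set.ofList loci).filter (fun l => PySem.Str.startswith l "D") with hFdef
  have hFnd : F.Nodup := (PySem.Set.nodup_ofList loci).filter _
  set cand := PySem.List.sorted F (fun l => l.toList) false with hcdef
  have hcp : cand.Perm F := PySem.List.sorted_perm F _ false
  have hcnd : cand.Nodup := hcp.symm.nodup hFnd
  set K := classIIOrderL.filter (fun l => cand.contains l) with hKdef
  rw [merge_loop_eq cand K hcnd]
  have hKE : cand.filter (fun l => !K.contains l)
      = cand.filter (fun l => !decide (l ∈ classIIOrderL)) := by
    refine List.filter_congr ?_
    intro x hx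
    have : K.contains x = decide (x ∈ classIIOrderL) := by
      by_cases h : x ∈ classIIOrderL
      · simp only [h, decide_true]
        rw [List.contains_iff_mem, hKdef]
        simp only [List.mem_filter]
        exact ⟨h, by simpa using hx⟩
      · simp only [h, decide_false]
        rw [Bool.eq_false_iff, Ne, List.contains_iff_mem, hKdef]
        simp only [List.mem_filter]
        rintro ⟨hmem, -⟩
        exact h hmem
    rw [this]
  rw [hKE]
  refine (PySem.List.sorted_eq_of_perm_of_pairwise_lt _ _ _ ?_ ?_).symm
  · -- (K ++ E).Perm F
    refine List.Perm.trans ?_ hcp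
    refine List.Perm.trans ?_ (List.filter_append_perm (fun l => decide (l ∈ classIIOrderL)) cand)
    refine List.Perm.append ?_ (List.Perm.refl _)
    rw [List.perm_ext_iff_of_nodup ((by decide : classIIOrderL.Nodup).filter _) (hcnd.filter _)]
    intro x
    simp only [List.mem_filter]
    constructor
    · rintro ⟨hx, hc⟩
      exact ⟨by simpa using hc, by simpa using hx⟩
    · rintro ⟨hxc, hd⟩
      exact ⟨by simpa using hd, by simpa using hxc⟩
  · -- Pairwise strictly increasing lexicographic key on K ++ E
    rw [List.pairwise_append]
    refine ⟨?_, ?_, ?_⟩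
    · exact List.Pairwise.filter _
        (by decide : classIIOrderL.Pairwise (fun a b =>
          (toLex (rankII.getD a (classIIOrderL.length : Int), a.toList) : Lex (Int × List Char))
            < toLex (rankII.getD b (classIIOrderL.length : Int), b.toList)))
    · -- inside E: equal rank 9, strictly increasing names
      have hle : cand.Pairwise (fun a b : String => a.toList ≤ b.toList) := by
        rw [hcdef, sorted_di (d2 := LinearOrder.toDecidableLT)]
        exact PySem.List.sorted_pairwise F _
      have hlt : cand.Pairwise (fun a b : String => a.toList < b.toList) := by
        refine (hle.and hcnd).imp ?_
        rintro a b ⟨h1, h2⟩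
        exact lt_of_le_of_ne h1 (fun e => h2 (String.toList_inj.mp e))
      refine (hlt.filter _).imp_of_mem ?_
      intro a b ha hb hab
      have ha9 := rank_notin a (by simpa using (List.of_mem_filter ha))
      have hb9 := rank_notin b (by simpa using (List.of_mem_filter hb))
      rw [Prod.Lex.toLex_lt_toLex]
      exact Or.inr ⟨by rw [ha9, hb9], hab⟩
    · -- across: known rank < 9 = unknown rank
      intro a ha b hb
      have haK : a ∈ classIIOrderL := (List.mem_filter.mp ha).1
      have ha8 : rankII.getD a (classIIOrderL.length : Int) < 9 :=
        (by decide : ∀ a ∈ classIIOrderL, rankII.getD a (classIIOrderL.length : Int) < 9) a haK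
      have hb9 := rank_notin b (by simpa using (List.of_mem_filter hb))
      rw [Prod.Lex.toLex_lt_toLex]
      exact Or.inl (by rw [hb9]; exact ha8)

-- ===== VERDICT (by name: the statement is the Claim_ definition above) =====
theorem order_loci_py_spec : Claim_equal_order_loci_py := by
  intro loci _
  unfold Spec_order_loci_py
  show order_loci_py loci = order_loci_py_alt loci
  unfold order_loci_py order_loci_py_alt
  simp only []
  rw [buckets_eq]
  simp only [List.nil_append]
  refine Prod.ext ?_ (Prod.ext ?_ ?_)
  · exact classI_eq loci
  · exact classII_eq loci
  · rw [other_filter_eq loci]
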